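-- pv_equiv track=rewrite | github.com/light-le/AdventOfCode | 2021/day15.py | attach_hor
-- ===== SOURCE A (Python) =====
-- def attach_hor(map_list):
--     big_map = []
--     for r in range(len(map_list[0])):
--         big_row = []
--         for map in map_list:
--             big_row.extend(map[r])
--         big_map.append(big_row)
--     return big_map
-- ===== SOURCE B (Python) =====
-- def attach_hor(map_list):
--     # Accumulate grid by grid: start with one empty row per row of the first
--     # grid, then fold each grid in, appending its rows column-wise.
--     big_map = [[] for _ in map_list[0]]
--     for m in map_list:
--         big_map = [acc + row for acc, row in zip(big_map, m)]
--     return big_map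
-- ===== Notes on version B (the rewrite author's own statement) =====
-- stated objective: alternative
-- what changed: B swaps the loop nesting: instead of building each output row by scanning all grids at a row index, it folds grid-by-grid into an accumulator of partial rows (one per row of the first grid), extending every partial row with the corresponding row of the current grid via zip.
import Mathlib
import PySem

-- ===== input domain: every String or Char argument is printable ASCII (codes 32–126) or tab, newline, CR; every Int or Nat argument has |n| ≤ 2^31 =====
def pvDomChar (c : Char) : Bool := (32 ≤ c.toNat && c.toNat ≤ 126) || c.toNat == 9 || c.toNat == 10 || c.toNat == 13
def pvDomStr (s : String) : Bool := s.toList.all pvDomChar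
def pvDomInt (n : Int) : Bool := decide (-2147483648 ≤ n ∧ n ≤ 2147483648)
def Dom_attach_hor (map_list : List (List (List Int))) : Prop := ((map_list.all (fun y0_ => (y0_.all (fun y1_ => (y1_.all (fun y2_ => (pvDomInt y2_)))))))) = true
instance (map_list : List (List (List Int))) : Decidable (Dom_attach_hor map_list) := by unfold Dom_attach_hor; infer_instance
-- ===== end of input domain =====

-- B swaps the loop nesting: it folds grid-by-grid into an accumulator of partial rows
-- (one per row of the first grid), extending each partial row with the matching row of
-- the current grid (alternative decomposition; rebuilding partial rows costs more per step).

-- ===== PORT A =====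
def attach_hor (map_list : List (List (List Int))) : List (List Int) :=
  (PySem.List.pyRange 0 (((PySem.List.pyGet? map_list 0).getD []).length : Int) 1).foldl
    (fun big_map r =>
      big_map ++ [map_list.foldl (fun big_row m => big_row ++ (PySem.List.pyGet? m r).getD []) []])
    []

-- ===== PORT B =====
-- one step of B's loop: big_map = [acc + row for acc, row in zip(big_map, m)]
def pvZipAcc (big_map : List (List Int)) (m : List (List Int)) : List (List Int) :=
  (big_map.zip m).map (fun p => p.1 ++ p.2)

def attach_hor_alt (map_list : List (List (List Int))) : List (List Int) :=
  map_list.foldl pvZipAcc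
    (((PySem.List.pyGet? map_list 0).getD []).map (fun _ => ([] : List Int)))

-- ===== PRECONDITION & SPEC =====
-- Pre_ excludes exactly the inputs on which A raises IndexError: an empty map_list
-- (map_list[0] fails) or a grid with fewer rows than the first grid (map[r] fails).
def Pre_attach_hor (map_list : List (List (List Int))) : Prop :=
  map_list ≠ [] ∧ ∀ m ∈ map_list, (map_list.headD []).length ≤ m.length
instance (map_list : List (List (List Int))) : Decidable (Pre_attach_hor map_list) := by
  unfold Pre_attach_hor; infer_instance
def pvWitness_attach_hor : List (List (List Int)) := [[[1, 2], [3]], [[4], [5, 6]]]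

def Spec_attach_hor (map_list : List (List (List Int))) (out : List (List Int)) : Prop := out = attach_hor_alt map_list
instance (map_list : List (List (List Int))) (out : List (List Int)) : Decidable (Spec_attach_hor map_list out) := by unfold Spec_attach_hor; infer_instance

-- ===== CLAIM (what is proved, stated in full; the proofs are below) =====
def Claim_equal_attach_hor : Prop := ∀ (map_list : List (List (List Int))), Dom_attach_hor map_list → Pre_attach_hor map_list → Spec_attach_hor map_list (attach_hor map_list)

-- ===== LEMMAS AND PROOFS =====

-- one zip-step on an accumulator written as a map over range n, when the grid has ≥ n rows
lemma pvZipAcc_map_range (n : ℕ) (f : ℕ → List Int) (m : List (List Int)) (h : n ≤ m.length) :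
    pvZipAcc ((List.range n).map f) m
      = (List.range n).map (fun k => f k ++ (PySem.List.pyGet? m (k : Int)).getD []) := by
  unfold pvZipAcc
  apply List.ext_getElem
  · simp [Nat.min_eq_left h]
  · intro k hk1 hk2
    simp only [List.length_map, List.length_zip, List.length_range, Nat.min_eq_left h] at hk1
    have hkm : k < m.length := lt_of_lt_of_le hk1 h
    simp [List.getElem_zip, PySem.List.pyGet?_natCast, List.getElem?_eq_getElem hkm]

-- invariant of B's fold: grid-by-grid accumulation equals, row-wise, the flatMap of all rows
lemma foldl_pvZipAcc (ms : List (List (List Int))) (n : ℕ) (f : ℕ → List Int)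
    (h : ∀ m ∈ ms, n ≤ m.length) :
    ms.foldl pvZipAcc ((List.range n).map f)
      = (List.range n).map
          (fun k => f k ++ ms.flatMap (fun m => (PySem.List.pyGet? m (k : Int)).getD [])) := by
  induction ms generalizing f with
  | nil => simp
  | cons m ms ih =>
    rw [List.foldl_cons, pvZipAcc_map_range n f m (h m (List.mem_cons_self))]
    rw [ih _ (fun m' hm' => h m' (List.mem_cons_of_mem _ hm'))]
    simp [List.append_assoc]

-- ===== VERDICT (by name: the statement is the Claim_ definition above) =====
theorem attach_hor_spec : Claim_equal_attach_hor := by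
  intro map_list _ hpre
  obtain ⟨hne, hlen⟩ := hpre
  obtain ⟨m0, rest, rfl⟩ := List.exists_cons_of_ne_nil hne
  have h0 : PySem.List.pyGet? (m0 :: rest) (0 : Int) = some m0 := by
    rw [show (0 : Int) = ((0 : ℕ) : Int) from rfl, PySem.List.pyGet?_natCast]; rfl
  unfold Spec_attach_hor attach_hor attach_hor_alt
  rw [h0]
  simp only [Option.getD_some]
  have hmap0 : m0.map (fun _ => ([] : List Int)) = (List.range m0.length).map (fun _ => []) := by
    apply List.ext_getElem <;> simp
  rw [hmap0, foldl_pvZipAcc _ _ _ (by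
    intro m hm
    have := hlen m hm
    simpa using this)]
  rw [PySem.List.pyRange_one]
  rw [List.foldl_map]
  rw [PySem.List.foldl_append_singleton_eq_map]
  simp only [List.nil_append]
  apply List.map_congr_left
  intro k hk
  rw [PySem.List.foldl_append_eq_flatMap]
  simp
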